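-- pv_equiv track=rewrite | github.com/DarkWinged/advent-of-code | 2021/03a/solution.py | transpose_entries
-- ===== SOURCE A (Python) =====
-- def transpose_entries(entries):
--     entry_transpose = {}
--     i = 0
--     while i < len(entries[0]):
--         entry_transpose[i] = []
--         i += 1
--
--     for entry in entries:
--         for index, character in enumerate(entry):
--             if character == '1':
--                 entry_transpose[index].append(True)
--             else:
--                 entry_transpose[index].append(False)
--     return entry_transpose
-- ===== SOURCE B (Python) =====
-- def transpose_entries(entries):
--     n = len(entries[0])
--     return {i: [entry[i] == '1' for entry in entries if i < len(entry)]
--             for i in range(n)}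
-- ===== Notes on version B (the rewrite author's own statement) =====
-- stated objective: simpler
-- what changed: A pre-builds a dict of empty lists with a while-loop and fills it row-by-row with nested append loops; B builds the result column-major in one dict comprehension, computing each column directly from the rows.
import Mathlib
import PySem

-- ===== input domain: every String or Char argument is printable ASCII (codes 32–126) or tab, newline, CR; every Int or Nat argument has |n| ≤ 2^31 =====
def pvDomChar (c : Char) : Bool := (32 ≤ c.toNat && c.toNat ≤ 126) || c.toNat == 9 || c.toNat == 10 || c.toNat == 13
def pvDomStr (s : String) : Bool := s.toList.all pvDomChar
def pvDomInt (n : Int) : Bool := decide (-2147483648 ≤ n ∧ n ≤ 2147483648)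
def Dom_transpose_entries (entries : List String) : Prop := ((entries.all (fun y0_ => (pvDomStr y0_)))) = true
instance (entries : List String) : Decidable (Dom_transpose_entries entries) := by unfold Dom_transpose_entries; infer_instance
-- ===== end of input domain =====

-- B builds the transposed dict column-major in one comprehension instead of A's
-- pre-initialised dict filled row-by-row with nested append loops (objective: simpler).

-- ===== PORT A =====
-- A raises IndexError on [] (the `none` arm is outside Pre_); entry_transpose[index].append
-- would raise KeyError for an index ≥ len(entries[0]) — also outside Pre_, so `modify`'s
-- default is never read on admitted inputs.
def transpose_entries (entries : List String) : List (Int × List Bool) :=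
  match PySem.List.pyGet? entries 0 with
  | none => []
  | some e0 =>
    let d0 : PySem.Dict Int (List Bool) :=
      (PySem.List.pyRange 0 (PySem.Str.len e0) 1).foldl
        (fun d i => d.insert i ([] : List Bool)) PySem.Dict.empty
    let d := entries.foldl (fun d entry =>
        (PySem.List.enumerate entry.toList 0).foldl (fun d p =>
          if p.2 == '1' then d.modify p.1 [] (fun l => l ++ [true])
          else d.modify p.1 [] (fun l => l ++ [false])) d) d0
    d.items

-- ===== PORT B =====
def transpose_entries_alt (entries : List String) : List (Int × List Bool) :=
  match PySem.List.pyGet? entries 0 with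
  | none => []
  | some e0 =>
    (PySem.List.pyRange 0 (PySem.Str.len e0) 1).map (fun i =>
      (i, entries.filterMap (fun entry =>
            if i < PySem.Str.len entry then
              some (PySem.List.pyGetD entry.toList i ' ' == '1')
            else none)))

-- ===== PRECONDITION & SPEC =====
-- Pre_ excludes exactly the inputs on which the Python A raises: the empty list
-- (IndexError on entries[0]) and lists where some entry is longer than entries[0] (KeyError).
def Pre_transpose_entries (entries : List String) : Prop :=
  entries ≠ [] ∧ ∀ e ∈ entries, PySem.Str.len e ≤ PySem.Str.len (entries.headD "")
instance (entries : List String) : Decidable (Pre_transpose_entries entries) := by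
  unfold Pre_transpose_entries; infer_instance
def pvWitness_transpose_entries : List String := (["10", "01", "11"])

def Spec_transpose_entries (entries : List String) (out : List (Int × List Bool)) : Prop := out = transpose_entries_alt entries
instance (entries : List String) (out : List (Int × List Bool)) : Decidable (Spec_transpose_entries entries out) := by unfold Spec_transpose_entries; infer_instance

-- ===== CLAIM (what is proved, stated in full; the proofs are below) =====
def Claim_equal_transpose_entries : Prop := ∀ (entries : List String), Dom_transpose_entries entries → Pre_transpose_entries entries → Spec_transpose_entries entries (transpose_entries entries)

-- ===== LEMMAS AND PROOFS =====

-- the column `entries` contribute at index i (B's inner comprehension, in `0 ≤ i ∧ ·` form)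
def pvCol (es : List String) (i : Int) : List Bool :=
  es.filterMap (fun e =>
    if 0 ≤ i ∧ i < (e.toList.length : Int) then
      some (PySem.List.pyGetD e.toList i ' ' == '1')
    else none)

-- filtering enumerate at one index keeps at most the entry at that index
lemma pv_enum_filter (cs : List Char) (s i : Int) :
    (PySem.List.enumerate cs s).filter (fun p => p.1 == i) =
      if s ≤ i ∧ i < s + cs.length then [(i, cs.getD (i - s).toNat ' ')] else [] := by
  induction cs generalizing s with
  | nil => simp [PySem.List.enumerate]
  | cons c tl ih =>
    rw [PySem.List.enumerate_cons, List.filter_cons, ih (s + 1)]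
    by_cases h : s = i
    · subst h
      have h1 : ¬ (s + 1 ≤ s ∧ s < s + 1 + (tl.length : Int)) := by omega
      have h2 : s ≤ s ∧ s < s + ((c :: tl).length : Int) := by simp only [List.length_cons]; push_cast; omega
      rw [if_neg h1, if_pos h2]
      simp
    · have hb : (s == i) = false := by simpa using h
      by_cases h2 : s + 1 ≤ i ∧ i < s + 1 + (tl.length : Int)
      · have h3 : s ≤ i ∧ i < s + ((c :: tl).length : Int) := by simp only [List.length_cons]; push_cast; omega
        rw [if_pos h2, if_pos h3]
        have ht : (i - s).toNat = (i - (s + 1)).toNat + 1 := by omega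
        simp [hb, ht]
      · have h3 : ¬ (s ≤ i ∧ i < s + ((c :: tl).length : Int)) := by simp only [List.length_cons]; push_cast; omega
        rw [if_neg h2, if_neg h3]
        simp [hb]

-- A's inner row loop is a modify-append loop over the (index, bit) pairs
lemma pv_row_eq (cs : List Char) (d : PySem.Dict Int (List Bool)) :
    (PySem.List.enumerate cs 0).foldl (fun d p =>
        if p.2 == '1' then d.modify p.1 [] (fun l => l ++ [true])
        else d.modify p.1 [] (fun l => l ++ [false])) d =
    ((PySem.List.enumerate cs 0).map (fun p => (p.1, p.2 == '1'))).foldl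
        (fun d p => d.modify p.1 [] (fun l => l ++ [p.2])) d := by
  have hfe : (fun (d : PySem.Dict Int (List Bool)) (p : Int × Char) =>
        if p.2 == '1' then d.modify p.1 [] (fun l => l ++ [true])
        else d.modify p.1 [] (fun l => l ++ [false]))
      = (fun d p => d.modify p.1 [] (fun l => l ++ [p.2 == '1'])) := by
    funext d p
    cases hh : (p.2 == '1') <;> simp [hh]  
  rw [hfe, List.foldl_map]

-- value of one row step at any index
lemma pv_row_getD (cs : List Char) (d : PySem.Dict Int (List Bool)) (i : Int) :
    ((PySem.List.enumerate cs 0).foldl (fun d p =>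
        if p.2 == '1' then d.modify p.1 [] (fun l => l ++ [true])
        else d.modify p.1 [] (fun l => l ++ [false])) d).getD i []
    = d.getD i [] ++
      (if 0 ≤ i ∧ i < (cs.length : Int) then [cs.getD i.toNat ' ' == '1'] else []) := by
  rw [pv_row_eq, PySem.Dict.getD_foldl_modify_append]
  congr 1
  have hf : ∀ (l : List (Int × Char)),
      (l.map (fun p => (p.1, p.2 == '1'))).filter (fun p => p.1 == i) =
      (l.filter (fun p => p.1 == i)).map (fun p => (p.1, p.2 == '1')) := by
    intro l; rw [List.filter_map]; rfl
  rw [hf, pv_enum_filter cs 0 i]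
  by_cases h : 0 ≤ i ∧ i < (cs.length : Int)
  · have h' : (0:Int) ≤ i ∧ i < 0 + (cs.length : Int) := by omega
    rw [if_pos h', if_pos h]
    simp
  · have h' : ¬ ((0:Int) ≤ i ∧ i < 0 + (cs.length : Int)) := by omega
    rw [if_neg h', if_neg h]
    rfl

-- updating a set with elements it already has changes nothing
lemma pv_update_of_subset (K : List Int) (xs : List Int) (h : ∀ x ∈ xs, x ∈ K) :
    PySem.Set.update K xs = K := by
  rw [PySem.Set.update_eq_append_filter]
  have : (PySem.Set.ofList xs).filter (fun y => !(PySem.Set.contains K y)) = [] := by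
    apply List.filter_eq_nil_iff.mpr
    intro y hy
    have hmem : y ∈ xs := (PySem.Set.mem_ofList _ _).mp hy
    simpa using h y hmem
  rw [this, List.append_nil]

-- keys of one row step are unchanged when every index of the row is already a key
lemma pv_row_keys (cs : List Char) (d : PySem.Dict Int (List Bool))
    (h : ∀ j ∈ PySem.List.pyRange 0 (cs.length : Int) 1, j ∈ d.keys) :
    ((PySem.List.enumerate cs 0).foldl (fun d p =>
        if p.2 == '1' then d.modify p.1 [] (fun l => l ++ [true])
        else d.modify p.1 [] (fun l => l ++ [false])) d).keys = d.keys := by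
  rw [pv_row_eq]
  rw [PySem.Dict.keys_foldl_modify_key]
  rw [List.map_map]
  have hm : ((PySem.List.enumerate cs 0).map ((·.1) ∘ fun p => (p.1, p.2 == '1')))
      = PySem.List.pyRange 0 (cs.length : Int) 1 := by
    have := PySem.List.map_fst_enumerate cs (0 : Int)
    simpa using this
  rw [hm]
  exact pv_update_of_subset _ _ h

-- main loop invariant: keys are preserved and each key accumulates its column
lemma pv_main_fold (es : List String) (d : PySem.Dict Int (List Bool))
    (hsub : ∀ e ∈ es, ∀ j ∈ PySem.List.pyRange 0 ((e.toList.length : Int)) 1, j ∈ d.keys) :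
    (es.foldl (fun d entry =>
        (PySem.List.enumerate entry.toList 0).foldl (fun d p =>
          if p.2 == '1' then d.modify p.1 [] (fun l => l ++ [true])
          else d.modify p.1 [] (fun l => l ++ [false])) d) d).keys = d.keys ∧
    ∀ i, (es.foldl (fun d entry =>
        (PySem.List.enumerate entry.toList 0).foldl (fun d p =>
          if p.2 == '1' then d.modify p.1 [] (fun l => l ++ [true])
          else d.modify p.1 [] (fun l => l ++ [false])) d) d).getD i []
      = d.getD i [] ++ pvCol es i := by
  induction es generalizing d with
  | nil => simp [pvCol]
  | cons e tl ih =>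
    simp only [List.foldl_cons]
    have hkeys := pv_row_keys e.toList d (hsub e List.mem_cons_self)
    have hsub' : ∀ e' ∈ tl, ∀ j ∈ PySem.List.pyRange 0 ((e'.toList.length : Int)) 1,
        j ∈ ((PySem.List.enumerate e.toList 0).foldl (fun d p =>
          if p.2 == '1' then d.modify p.1 [] (fun l => l ++ [true])
          else d.modify p.1 [] (fun l => l ++ [false])) d).keys := by
      intro e' he' j hj
      rw [hkeys]
      exact hsub e' (List.mem_cons_of_mem _ he') j hj
    obtain ⟨ihk, ihv⟩ := ih _ hsub'
    refine ⟨by rw [ihk, hkeys], ?_⟩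
    intro i
    rw [ihv i, pv_row_getD, List.append_assoc]
    congr 1
    simp only [pvCol, List.filterMap_cons]
    by_cases h : 0 ≤ i ∧ i < (e.toList.length : Int)
    · have h2 : i < (e.length : Int) := by simpa using h.2
      have hpg : PySem.List.pyGetD e.toList i ' ' = e.toList.getD i.toNat ' ' := by
        rw [PySem.List.pyGetD_eq_getElem e.toList ' ' h.1 (by simpa using h.2)]
        rw [List.getD_eq_getElem _ _ (by have := h.2; omega)]
      simp [h, h.1, h2, hpg]
    · have h2 : ¬ (0 ≤ i ∧ i < (e.length : Int)) := by simpa using h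
      simp [h, h2]

-- the initial while-loop dict: items are (i, []) for i in range(n)
lemma pv_init_items (N : Int) :
    ((PySem.List.pyRange 0 N 1).foldl
        (fun d i => d.insert i ([] : List Bool)) PySem.Dict.empty).items
    = (PySem.List.pyRange 0 N 1).map (fun i => (i, ([] : List Bool))) := by
  have := PySem.Dict.items_foldl_insert_fresh (d := (PySem.Dict.empty : PySem.Dict Int (List Bool)))
    (l := PySem.List.pyRange 0 N 1) (k := fun i => i) (v := fun _ => ([] : List Bool))
    (by intro a _; simp [PySem.Dict.contains_empty])
    (by simpa using PySem.List.nodup_pyRange_one 0 N)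
  simpa [PySem.Dict.items] using this

theorem transpose_entries_spec : Claim_equal_transpose_entries := by
  intro entries _ hpre
  obtain ⟨hne, hlen⟩ := hpre
  obtain ⟨e0, rest, rfl⟩ : ∃ e0 rest, entries = e0 :: rest := by
    cases entries with
    | nil => exact absurd rfl hne
    | cons a l => exact ⟨a, l, rfl⟩
  unfold Spec_transpose_entries transpose_entries transpose_entries_alt
  have hget : PySem.List.pyGet? (e0 :: rest) 0 = some e0 := by
    simp [PySem.List.pyGet?, PySem.List.pyIdx?]
  simp only [hget]
  set R := PySem.List.pyRange 0 (PySem.Str.len e0) 1 with hRdef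
  set d0 := R.foldl (fun d i => d.insert i ([] : List Bool))
      (PySem.Dict.empty : PySem.Dict Int (List Bool)) with hd0def
  have hitems0 : d0.items = R.map (fun i => (i, ([] : List Bool))) := pv_init_items _
  have hkeys0 : d0.keys = R := by
    show d0.items.map (·.1) = R
    rw [hitems0, List.map_map]
    have hcomp : ((·.1) ∘ fun i : Int => (i, ([] : List Bool))) = id := rfl
    rw [hcomp, List.map_id]
  have hnd : R.Nodup := PySem.List.nodup_pyRange_one 0 _
  have hgd0 : ∀ i ∈ R, d0.getD i [] = [] := by
    intro i hi
    exact PySem.Dict.getD_of_mem_items d0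
      (by rw [hitems0]; exact List.mem_map_of_mem hi) (hkeys0 ▸ hnd) []
  have hsub : ∀ e ∈ e0 :: rest, ∀ j ∈ PySem.List.pyRange 0 ((e.toList.length : Int)) 1,
      j ∈ d0.keys := by
    intro e he j hj
    rw [hkeys0, hRdef]
    rw [PySem.List.mem_pyRange_one] at hj ⊢
    have hle := hlen e he
    simp only [PySem.Str.len_eq, List.headD_cons] at hle ⊢
    omega
  obtain ⟨hk, hv⟩ := pv_main_fold (e0 :: rest) d0 hsub
  rw [PySem.Dict.items_eq_map_keys _ (by rw [hk, hkeys0]; exact hnd) []]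
  rw [hk, hkeys0]
  apply List.map_congr_left
  intro i hi
  rw [hv i, hgd0 i hi]
  have h0i : 0 ≤ i := by
    rw [hRdef, PySem.List.mem_pyRange_one] at hi
    exact hi.1
  simp only [List.nil_append]
  congr 1
  unfold pvCol
  apply List.filterMap_congr
  intro e _
  rw [PySem.Str.len_eq]
  by_cases h : i < (e.toList.length : Int)
  · rw [if_pos ⟨h0i, h⟩, if_pos h]
  · rw [if_neg (by tauto), if_neg h]
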